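-- pv_equiv track=rewrite | github.com/radoneje/chessCore | rawParser.py | parseString
-- ===== SOURCE A (Python) =====
-- def parseString(serialString, stack):
--
--     if(len(serialString)>0):
--         byte=serialString[0]
--         if byte>=0x80:
--             arr=[byte,]
--             stack.append(arr)
--         else:
--             stack[len(stack)-1].append(byte)
--         serialString=serialString[1:]
--         return parseString(serialString, stack)
--     return stack
-- ===== SOURCE B (Python) =====
-- def parseString(serialString, stack):
--     for byte in serialString:
--         if byte >= 0x80:
--             stack.append([byte])
--         else:
--             stack[-1].append(byte)
--     return stack
-- ===== Notes on version B (the rewrite author's own statement) =====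
-- stated objective: faster
-- what changed: Replaces tail recursion with O(n) copying slices serialString[1:] by a single iterative for-loop over the bytes with no slicing or recursion.
import Mathlib
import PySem

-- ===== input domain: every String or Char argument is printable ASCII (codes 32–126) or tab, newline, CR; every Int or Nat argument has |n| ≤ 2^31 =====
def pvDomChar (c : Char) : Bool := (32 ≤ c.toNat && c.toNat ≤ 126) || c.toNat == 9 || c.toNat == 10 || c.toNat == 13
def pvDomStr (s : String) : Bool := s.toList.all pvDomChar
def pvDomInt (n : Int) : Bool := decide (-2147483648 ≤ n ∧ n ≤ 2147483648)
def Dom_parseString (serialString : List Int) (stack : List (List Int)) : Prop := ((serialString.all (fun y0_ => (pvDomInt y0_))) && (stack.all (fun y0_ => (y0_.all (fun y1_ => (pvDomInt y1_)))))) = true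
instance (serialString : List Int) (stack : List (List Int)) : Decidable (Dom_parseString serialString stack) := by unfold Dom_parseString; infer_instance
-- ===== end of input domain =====

-- ===== PORT A =====
-- A mutates `stack` in place (append); the equivalence proved here is about the RETURN value,
-- and B performs the same mutations. A recurses on serialString[1:]; stack[len(stack)-1].append
-- raises IndexError on an empty stack — excluded by Pre_ (port uses getLastD there).
def pvAppendLast (stack : List (List Int)) (byte : Int) : List (List Int) :=
  stack.dropLast ++ [stack.getLastD [] ++ [byte]]

def parseString (serialString : List Int) (stack : List (List Int)) : List (List Int) :=
  if serialString.length > 0 then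
    let byte := serialString.headD 0  -- serialString[0], in range by the length test
    let stack' :=
      if byte ≥ 0x80 then stack ++ [[byte]]  -- stack.append([byte])
      else pvAppendLast stack byte           -- stack[len(stack)-1].append(byte)
    parseString (PySem.List.slice serialString (some 1) none) stack'  -- serialString[1:]
  else stack
termination_by serialString.length
decreasing_by simp [PySem.List.slice_from_one]; omega

-- ===== PORT B =====
def parseString_alt (serialString : List Int) (stack : List (List Int)) : List (List Int) :=
  serialString.foldl
    (fun st byte =>
      if byte ≥ 0x80 then st ++ [[byte]]
      else st.dropLast ++ [st.getLastD [] ++ [byte]])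
    stack

-- ===== PRECONDITION & SPEC =====
-- Pre_ excludes exactly the inputs where A (and B alike) raises IndexError: an empty stack
-- together with a leading byte < 0x80 (appending to the last group of an empty stack).
def Pre_parseString (serialString : List Int) (stack : List (List Int)) : Prop :=
  stack ≠ [] ∨ serialString = [] ∨ 0x80 ≤ serialString.headD 0
instance (serialString : List Int) (stack : List (List Int)) : Decidable (Pre_parseString serialString stack) := by unfold Pre_parseString; infer_instance
def pvWitness_parseString : List Int × List (List Int) := ([0x81, 5, 0x90, 6], [])
def Spec_parseString (serialString : List Int) (stack : List (List Int)) (out : List (List Int)) : Prop := out = parseString_alt serialString stack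
instance (serialString : List Int) (stack : List (List Int)) (out : List (List Int)) : Decidable (Spec_parseString serialString stack out) := by unfold Spec_parseString; infer_instance

-- ===== CLAIM (what is proved, stated in full; the proofs are below) =====
def Claim_equal_parseString : Prop := ∀ (serialString : List Int) (stack : List (List Int)), Dom_parseString serialString stack → Pre_parseString serialString stack → Spec_parseString serialString stack (parseString serialString stack)

-- ===== LEMMAS AND PROOFS =====
theorem parseString_eq_foldl (serialString : List Int) (stack : List (List Int)) :
    parseString serialString stack = parseString_alt serialString stack := by
  induction serialString generalizing stack with
  | nil => simp [parseString, parseString_alt]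
  | cons b rest ih =>
      rw [parseString]
      simp only [List.length_cons, PySem.List.slice_from_one, List.tail_cons, List.headD_cons,
        Nat.zero_lt_succ]
      rw [ih]
      simp [parseString_alt, pvAppendLast]

-- ===== VERDICT (by name: the statement is the Claim_ definition above) =====
theorem parseString_spec : Claim_equal_parseString := by
  intro s st _ _
  exact parseString_eq_foldl s st
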